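-- pv_equiv track=rewrite | github.com/oddbird/portfoliyo | portfoliyo/sms/base.py | split_sms
-- ===== SOURCE A (Python) =====
-- def split_sms(text, joiner='...'):
--     """
--     Return iterable of chunks of ``text`` <=160 chars each.
--
--     Joined components will end/begin with ``joiner``.
--
--     """
--     joiner_len = len(joiner)
--     while True:
--         if len(text) <= 160:
--             yield text
--             break
--         breakpoint = 160-joiner_len
--         yield text[:breakpoint] + joiner
--         text = joiner + text[breakpoint:]
-- ===== SOURCE B (Python) =====
-- def split_sms(text, joiner='...'):
--     """Index-based single pass: emit chunks without recopying the tail."""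
--     n = len(text)
--     jl = len(joiner)
--     if n <= 160:
--         yield text
--         return
--     b = 160 - jl
--     yield text[:b] + joiner
--     step = b - jl
--     i = b
--     while jl + (n - i) > 160:
--         yield joiner + text[i:i+step] + joiner
--         i += step
--     yield joiner + text[i:]
-- ===== Notes on version B (the rewrite author's own statement) =====
-- stated objective: alternative
-- what changed: B walks the original string with an integer cursor and slices each chunk directly, instead of A's loop that rebuilds the whole remaining tail (joiner + text[breakpoint:]) on every iteration.
import Mathlib
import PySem

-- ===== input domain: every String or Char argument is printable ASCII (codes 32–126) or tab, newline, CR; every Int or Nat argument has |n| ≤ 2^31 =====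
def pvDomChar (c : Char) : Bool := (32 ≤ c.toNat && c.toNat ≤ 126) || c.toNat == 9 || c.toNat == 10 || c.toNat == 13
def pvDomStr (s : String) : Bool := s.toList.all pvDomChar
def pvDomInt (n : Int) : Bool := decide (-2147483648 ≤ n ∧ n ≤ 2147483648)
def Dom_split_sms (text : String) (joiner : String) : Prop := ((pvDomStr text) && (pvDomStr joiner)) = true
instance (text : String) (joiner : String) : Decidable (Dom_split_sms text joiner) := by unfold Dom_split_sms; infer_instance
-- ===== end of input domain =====

-- B replaces A's loop, which rebuilds the whole remaining tail each iteration, by an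
-- integer cursor over the original text slicing out each chunk directly.

-- ===== PORT A =====
-- A's `while True` loop as fuel-indexed recursion over the char list; fuel = len(text)+1
-- suffices on every input where the Python loop terminates (each pass shortens text by ≥ 2).
def splitA_loop (fuel : Nat) (j : List Char) (t : List Char) : List (List Char) :=
  match fuel with
  | 0 => []
  | f + 1 =>
    if t.length ≤ 160 then [t]
    else
      let b : Int := 160 - (j.length : Int)
      (PySem.List.slice t none (some b) ++ j) ::
        splitA_loop f j (j ++ PySem.List.slice t (some b) none)

def split_sms (text : String) (joiner : String) : List String :=
  (splitA_loop (text.toList.length + 1) joiner.toList text.toList).map String.ofList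

-- ===== PORT B =====
def splitB_loop (fuel : Nat) (j : List Char) (t : List Char) (step : Int) (i : Int) :
    List (List Char) :=
  match fuel with
  | 0 => []
  | f + 1 =>
    if (j.length : Int) + ((t.length : Int) - i) ≤ 160 then
      [j ++ PySem.List.slice t (some i) none]
    else
      (j ++ PySem.List.slice t (some i) (some (i + step)) ++ j) ::
        splitB_loop f j t step (i + step)

def splitB (j : List Char) (t : List Char) : List (List Char) :=
  if t.length ≤ 160 then [t]
  else
    let b : Int := 160 - (j.length : Int)
    (PySem.List.slice t none (some b) ++ j) ::
      splitB_loop (t.length + 1) j t (b - (j.length : Int)) b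

def split_sms_alt (text : String) (joiner : String) : List String :=
  (splitB joiner.toList text.toList).map String.ofList

-- ===== PRECONDITION & SPEC =====
-- Pre_ excludes exactly the inputs where A's generator never terminates (len(text) > 160
-- with len(joiner) ≥ 80: the rebuilt tail never gets shorter), so list(A) diverges there.
def Pre_split_sms (text : String) (joiner : String) : Prop :=
  text.toList.length ≤ 160 ∨ joiner.toList.length ≤ 79
instance (text : String) (joiner : String) : Decidable (Pre_split_sms text joiner) := by
  unfold Pre_split_sms; infer_instance
def pvWitness_split_sms : String × String := ("hello world", "...")

def Spec_split_sms (text : String) (joiner : String) (out : List String) : Prop :=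
  out = split_sms_alt text joiner
instance (text : String) (joiner : String) (out : List String) :
    Decidable (Spec_split_sms text joiner out) := by unfold Spec_split_sms; infer_instance

-- ===== CLAIM (what is proved, stated in full; the proofs are below) =====
def Claim_equal_split_sms : Prop := ∀ (text : String) (joiner : String),
  Dom_split_sms text joiner → Pre_split_sms text joiner →
  Spec_split_sms text joiner (split_sms text joiner)

-- ===== LEMMAS AND PROOFS =====

-- A's loop started on (joiner ++ t.drop i) equals B's cursor loop at position i.
lemma split_sms_bridge (j t : List Char) (hj : j.length ≤ 79) :
    ∀ (fa fb i : Nat), i ≤ t.length → t.length - i < fa → t.length - i < fb →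
    splitA_loop fa j (j ++ t.drop i) =
      splitB_loop fb j t ((160 - (j.length : Int)) - (j.length : Int)) (i : Int) := by
  intro fa
  induction fa with
  | zero => intro fb i _ hfa _; omega
  | succ f ih =>
    intro fb i hi hfa hfb
    match fb with
    | 0 => omega
    | fb + 1 =>
      simp only [splitA_loop, splitB_loop]
      have hlen : (j ++ t.drop i).length = j.length + (t.length - i) := by
        simp [List.length_drop]
      by_cases hstop : j.length + (t.length - i) ≤ 160
      · rw [if_pos (by omega), if_pos (by omega)]
        rw [PySem.List.slice_from_natCast]
      · rw [if_neg (by omega), if_neg (by omega)]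
        have hb : (160 - (j.length : Int)) = ((160 - j.length : Nat) : Int) := by omega
        have hstepc : (160 - (j.length : Int)) - (j.length : Int)
            = ((160 - 2 * j.length : Nat) : Int) := by omega
        have hii : (i : Int) + ((160 - 2 * j.length : Nat) : Int)
            = ((i + (160 - 2 * j.length) : Nat) : Int) := by omega
        rw [hstepc, hb, PySem.List.slice_to_natCast, PySem.List.slice_from_natCast,
          PySem.List.slice_natCast_add, hii]
        have hchunk : (j ++ t.drop i).take (160 - j.length)
            = j ++ (t.drop i).take (160 - 2 * j.length) := by
          rw [List.take_append, List.take_of_length_le (by omega)]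
          congr 2; omega
        have htail : (j ++ t.drop i).drop (160 - j.length)
            = t.drop (i + (160 - 2 * j.length)) := by
          rw [List.drop_append, List.drop_of_length_le (by omega), List.drop_drop]
          simp only [List.nil_append]
          congr 1; omega
        rw [hchunk, htail]
        congr 1
        have ih' := ih fb (i + (160 - 2 * j.length)) (by omega) (by omega) (by omega)
        rw [hstepc] at ih'
        exact ih'

lemma split_sms_lists (j t : List Char) (hpre : t.length ≤ 160 ∨ j.length ≤ 79) :
    splitA_loop (t.length + 1) j t = splitB j t := by
  unfold splitB
  by_cases h : t.length ≤ 160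
  · simp [splitA_loop, h]
  · have hj : j.length ≤ 79 := by omega
    simp only [splitA_loop, if_neg h]
    congr 1
    have hb : (160 - (j.length : Int)) = ((160 - j.length : Nat) : Int) := by omega
    rw [hb, PySem.List.slice_from_natCast]
    have hbr := split_sms_bridge j t hj t.length (t.length + 1) (160 - j.length)
      (by omega) (by omega) (by omega)
    rw [hb] at hbr
    exact hbr

-- ===== VERDICT (by name: the statement is the Claim_ definition above) =====
theorem split_sms_spec : Claim_equal_split_sms := by
  intro text joiner _ hpre
  unfold Spec_split_sms split_sms split_sms_alt
  rw [split_sms_lists joiner.toList text.toList hpre]
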